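-- pv_equiv track=rewrite | github.com/pah-dev/scraper-rctrl | app/tools.py | get_brand_logo
-- ===== SOURCE A (Python) =====
-- def get_brand_logo(txt: str):
--     ret = ""
--     urlBase = "https://www.toprace.com.ar/vistas/tr/images/logos/"
--     urlBase2 = "https://tc2000.com.ar/assets/images/"
--     urlBase3 = "https://www.actc.org.ar/vistas/v3/images/logos/"
--     urlBase4 = "http://motorcycle-brands.com/wp-content/uploads/"
--     txt = txt.upper()
--     if any(word in txt for word in ["AUDI"]):
--         ret = urlBase+"logo-audi-sm.png"
--     elif ("APRILIA" in txt):
--         ret = urlBase4+"2016/08/Aprilia-logo-500x188.png"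
--     elif ("BETA" in txt):
--         ret = urlBase4+"2017/10/Beta-Logo-500x393.png"
--     elif ("BMW" in txt):
--         ret = urlBase+"logo-bmw-sm.png"
--     elif any(word in txt for word in ["CHEV", "CRUZE", "ONIX", "CORSA", "CELTA"]):
--         ret = urlBase+"logo-chevrolet-sm.png"
--     elif any(word in txt for word in ["CITROEN", "CITROËN", "C4", "DS3"]):
--         ret = urlBase+"logo-citroen-sm.png"
--     elif any(word in txt for word in ["DODGE"]):
--         ret = urlBase3+"logo-dodge-xs.png"
--     elif ("DUCATI" in txt):
--         ret = urlBase4+"2016/07/ducati-logo-500x188.png"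
--     elif any(word in txt for word in ["FIAT", "TIPO", "PALIO", "ARGO", "MOBI"]):
--         ret = urlBase+"logo-fiat-sm.png"
--     elif any(word in txt for word in ["FORD", "FOCUS", "FIESTA", "KINETIC"]):
--         ret = urlBase+"logo-ford-sm.png"
--     elif any(word in txt for word in ["GEELY"]):
--         ret = urlBase+"logo-geely-sm.png"
--     elif ("HRC" in txt):
--         ret = urlBase4+"2016/08/honda-motorcycle-logo-500x188.png"
--     elif any(word in txt for word in ["HONDA", "CIVIC"]):
--         ret = urlBase2+"logo_honda.png"
--     elif ("HUSQVARNA" in txt):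
--         ret = urlBase4+"2016/08/Husqvarna-logo-500x188.png"
--     elif any(word in txt for word in ["HYUNDAI", "VELOSTER"]):
--         ret = ""
--     elif any(word in txt for word in ["KAWASAKI", "NINJA"]):
--         ret = urlBase4+"2016/08/Kawasaki-logo-500x188.png"
--     elif any(word in txt for word in ["KIA", "CERATO"]):
--         ret = ""
--     elif ("KTM" in txt):
--         ret = urlBase4+"2016/08/KTM-logo-500x188.png"
--     elif any(word in txt for word in ["MERCEDES", "BENZ"]):
--         ret = urlBase+"logo-mbenz-sm.png"
--     elif any(word in txt for word in ["MITSU", "LANCER"]):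
--         ret = urlBase+"logo-mitsubishi-sm.png"
--     elif any(word in txt for word in ["MV AGUSTA", "AGUSTA"]):
--         ret = urlBase4+"2017/10/mv-agusta-logo-500x345.png"
--     elif any(word in txt for word in ["NISSAN", "MARCH"]):
--         ret = urlBase3+"logo-nissan-xs.png"
--     elif any(word in txt for word in ["PEUGEOT", "408", "208"]):
--         ret = urlBase+"logo-peugeot-sm.png"
--     elif ("POLARIS" in txt):
--         ret = urlBase4+"2017/01/Polaris-Logo-500x276.png"
--     elif any(word in txt for word in ["PORSCHE", "911"]):
--         ret = urlBase+"logo-porsche-sm.png"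
--     elif any(word in txt for word in ["RENAULT", "CLIO"]):
--         ret = urlBase2+"logo_renault.png"
--     elif any(word in txt for word in ["SUZUKI"]):
--         ret = urlBase4+"2016/08/suzuki-motorcycle-logo-500x188.png"
--     elif ("TORINO" in txt):
--         ret = urlBase3+"logo-torino-xs.png"
--     elif any(word in txt for word in ["TOYOTA", "COROLLA", "ETIOS"]):
--         ret = urlBase+"logo-toyota-sm.png"
--     elif any(word in txt for word in ["TRIUMPH", "NTS"]):
--         ret = urlBase4+"2016/08/triumph-logo-500x188.png"
--     elif any(word in txt for word in ["VW", "VOLKS", "VENTO", "GOL", "VOYAGE"]):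
--         ret = urlBase+"logo-vw-sm.png"
--     elif ("VOLVO" in txt):
--         ret = urlBase+"logo-volvo-sm.png"
--     elif ("YAMAHA" in txt):
--         ret = urlBase4+"2016/08/Yamaha-logo-500x188.png"
--     return ret
-- ===== SOURCE B (Python) =====
-- # B: flat keyword -> (priority, url) map; one pass over the map selecting the
-- # minimum-priority matching keyword, instead of an ordered first-match elif chain.
-- _U1 = "https://www.toprace.com.ar/vistas/tr/images/logos/"
-- _U2 = "https://tc2000.com.ar/assets/images/"
-- _U3 = "https://www.actc.org.ar/vistas/v3/images/logos/"
-- _U4 = "http://motorcycle-brands.com/wp-content/uploads/"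
--
-- _RULES = [
--     (["AUDI"], _U1 + "logo-audi-sm.png"),
--     (["APRILIA"], _U4 + "2016/08/Aprilia-logo-500x188.png"),
--     (["BETA"], _U4 + "2017/10/Beta-Logo-500x393.png"),
--     (["BMW"], _U1 + "logo-bmw-sm.png"),
--     (["CHEV", "CRUZE", "ONIX", "CORSA", "CELTA"], _U1 + "logo-chevrolet-sm.png"),
--     (["CITROEN", "CITRO\u00cbN", "C4", "DS3"], _U1 + "logo-citroen-sm.png"),
--     (["DODGE"], _U3 + "logo-dodge-xs.png"),
--     (["DUCATI"], _U4 + "2016/07/ducati-logo-500x188.png"),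
--     (["FIAT", "TIPO", "PALIO", "ARGO", "MOBI"], _U1 + "logo-fiat-sm.png"),
--     (["FORD", "FOCUS", "FIESTA", "KINETIC"], _U1 + "logo-ford-sm.png"),
--     (["GEELY"], _U1 + "logo-geely-sm.png"),
--     (["HRC"], _U4 + "2016/08/honda-motorcycle-logo-500x188.png"),
--     (["HONDA", "CIVIC"], _U2 + "logo_honda.png"),
--     (["HUSQVARNA"], _U4 + "2016/08/Husqvarna-logo-500x188.png"),
--     (["HYUNDAI", "VELOSTER"], ""),
--     (["KAWASAKI", "NINJA"], _U4 + "2016/08/Kawasaki-logo-500x188.png"),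
--     (["KIA", "CERATO"], ""),
--     (["KTM"], _U4 + "2016/08/KTM-logo-500x188.png"),
--     (["MERCEDES", "BENZ"], _U1 + "logo-mbenz-sm.png"),
--     (["MITSU", "LANCER"], _U1 + "logo-mitsubishi-sm.png"),
--     (["MV AGUSTA", "AGUSTA"], _U4 + "2017/10/mv-agusta-logo-500x345.png"),
--     (["NISSAN", "MARCH"], _U3 + "logo-nissan-xs.png"),
--     (["PEUGEOT", "408", "208"], _U1 + "logo-peugeot-sm.png"),
--     (["POLARIS"], _U4 + "2017/01/Polaris-Logo-500x276.png"),
--     (["PORSCHE", "911"], _U1 + "logo-porsche-sm.png"),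
--     (["RENAULT", "CLIO"], _U2 + "logo_renault.png"),
--     (["SUZUKI"], _U4 + "2016/08/suzuki-motorcycle-logo-500x188.png"),
--     (["TORINO"], _U3 + "logo-torino-xs.png"),
--     (["TOYOTA", "COROLLA", "ETIOS"], _U1 + "logo-toyota-sm.png"),
--     (["TRIUMPH", "NTS"], _U4 + "2016/08/triumph-logo-500x188.png"),
--     (["VW", "VOLKS", "VENTO", "GOL", "VOYAGE"], _U1 + "logo-vw-sm.png"),
--     (["VOLVO"], _U1 + "logo-volvo-sm.png"),
--     (["YAMAHA"], _U4 + "2016/08/Yamaha-logo-500x188.png"),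
-- ]
--
-- # flat map: every keyword independently carries (rule priority, url)
-- KEYWORDS = {w: (pri, url) for pri, (ws, url) in enumerate(_RULES) for w in ws}
--
--
-- def get_brand_logo(txt: str):
--     t = txt.upper()
--     best = None
--     for word, (pri, url) in KEYWORDS.items():
--         if word in t and (best is None or pri < best[0]):
--             best = (pri, url)
--     return best[1] if best is not None else ""
-- ===== Notes on version B (the rewrite author's own statement) =====
-- stated objective: alternative
-- what changed: Replaces the ordered 33-branch elif chain (first-match with short-circuit) by a flat keyword->(priority,url) dict built once and a single pass over all keywords that selects the minimum-priority match.
import Mathlib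
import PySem

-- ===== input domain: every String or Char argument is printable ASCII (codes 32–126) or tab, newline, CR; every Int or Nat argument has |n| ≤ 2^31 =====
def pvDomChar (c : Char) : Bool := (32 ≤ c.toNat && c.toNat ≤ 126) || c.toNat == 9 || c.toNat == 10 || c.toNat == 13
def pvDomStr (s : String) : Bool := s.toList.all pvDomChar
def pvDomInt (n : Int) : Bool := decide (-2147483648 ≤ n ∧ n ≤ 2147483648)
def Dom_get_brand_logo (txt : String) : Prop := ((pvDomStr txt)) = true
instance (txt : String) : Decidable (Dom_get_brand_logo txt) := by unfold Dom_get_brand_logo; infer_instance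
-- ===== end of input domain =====

-- B replaces A's ordered 33-branch elif chain by a flat keyword -> (priority, url)
-- map and a single pass selecting the minimum-priority matching keyword
-- (objective: alternative); same return value.

-- ===== PORT A =====
def get_brand_logo (txt : String) : String :=
  let urlBase := "https://www.toprace.com.ar/vistas/tr/images/logos/"
  let urlBase2 := "https://tc2000.com.ar/assets/images/"
  let urlBase3 := "https://www.actc.org.ar/vistas/v3/images/logos/"
  let urlBase4 := "http://motorcycle-brands.com/wp-content/uploads/"
  let t := PySem.Str.upper txt
  if ["AUDI"].any (fun w => PySem.Str.isIn w t) then urlBase ++ "logo-audi-sm.png"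
  else if PySem.Str.isIn "APRILIA" t then urlBase4 ++ "2016/08/Aprilia-logo-500x188.png"
  else if PySem.Str.isIn "BETA" t then urlBase4 ++ "2017/10/Beta-Logo-500x393.png"
  else if PySem.Str.isIn "BMW" t then urlBase ++ "logo-bmw-sm.png"
  else if ["CHEV", "CRUZE", "ONIX", "CORSA", "CELTA"].any (fun w => PySem.Str.isIn w t) then urlBase ++ "logo-chevrolet-sm.png"
  else if ["CITROEN", "CITROËN", "C4", "DS3"].any (fun w => PySem.Str.isIn w t) then urlBase ++ "logo-citroen-sm.png"
  else if ["DODGE"].any (fun w => PySem.Str.isIn w t) then urlBase3 ++ "logo-dodge-xs.png"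
  else if PySem.Str.isIn "DUCATI" t then urlBase4 ++ "2016/07/ducati-logo-500x188.png"
  else if ["FIAT", "TIPO", "PALIO", "ARGO", "MOBI"].any (fun w => PySem.Str.isIn w t) then urlBase ++ "logo-fiat-sm.png"
  else if ["FORD", "FOCUS", "FIESTA", "KINETIC"].any (fun w => PySem.Str.isIn w t) then urlBase ++ "logo-ford-sm.png"
  else if ["GEELY"].any (fun w => PySem.Str.isIn w t) then urlBase ++ "logo-geely-sm.png"
  else if PySem.Str.isIn "HRC" t then urlBase4 ++ "2016/08/honda-motorcycle-logo-500x188.png"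
  else if ["HONDA", "CIVIC"].any (fun w => PySem.Str.isIn w t) then urlBase2 ++ "logo_honda.png"
  else if PySem.Str.isIn "HUSQVARNA" t then urlBase4 ++ "2016/08/Husqvarna-logo-500x188.png"
  else if ["HYUNDAI", "VELOSTER"].any (fun w => PySem.Str.isIn w t) then ""
  else if ["KAWASAKI", "NINJA"].any (fun w => PySem.Str.isIn w t) then urlBase4 ++ "2016/08/Kawasaki-logo-500x188.png"
  else if ["KIA", "CERATO"].any (fun w => PySem.Str.isIn w t) then ""
  else if PySem.Str.isIn "KTM" t then urlBase4 ++ "2016/08/KTM-logo-500x188.png"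
  else if ["MERCEDES", "BENZ"].any (fun w => PySem.Str.isIn w t) then urlBase ++ "logo-mbenz-sm.png"
  else if ["MITSU", "LANCER"].any (fun w => PySem.Str.isIn w t) then urlBase ++ "logo-mitsubishi-sm.png"
  else if ["MV AGUSTA", "AGUSTA"].any (fun w => PySem.Str.isIn w t) then urlBase4 ++ "2017/10/mv-agusta-logo-500x345.png"
  else if ["NISSAN", "MARCH"].any (fun w => PySem.Str.isIn w t) then urlBase3 ++ "logo-nissan-xs.png"
  else if ["PEUGEOT", "408", "208"].any (fun w => PySem.Str.isIn w t) then urlBase ++ "logo-peugeot-sm.png"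
  else if PySem.Str.isIn "POLARIS" t then urlBase4 ++ "2017/01/Polaris-Logo-500x276.png"
  else if ["PORSCHE", "911"].any (fun w => PySem.Str.isIn w t) then urlBase ++ "logo-porsche-sm.png"
  else if ["RENAULT", "CLIO"].any (fun w => PySem.Str.isIn w t) then urlBase2 ++ "logo_renault.png"
  else if ["SUZUKI"].any (fun w => PySem.Str.isIn w t) then urlBase4 ++ "2016/08/suzuki-motorcycle-logo-500x188.png"
  else if PySem.Str.isIn "TORINO" t then urlBase3 ++ "logo-torino-xs.png"
  else if ["TOYOTA", "COROLLA", "ETIOS"].any (fun w => PySem.Str.isIn w t) then urlBase ++ "logo-toyota-sm.png"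
  else if ["TRIUMPH", "NTS"].any (fun w => PySem.Str.isIn w t) then urlBase4 ++ "2016/08/triumph-logo-500x188.png"
  else if ["VW", "VOLKS", "VENTO", "GOL", "VOYAGE"].any (fun w => PySem.Str.isIn w t) then urlBase ++ "logo-vw-sm.png"
  else if PySem.Str.isIn "VOLVO" t then urlBase ++ "logo-volvo-sm.png"
  else if PySem.Str.isIn "YAMAHA" t then urlBase4 ++ "2016/08/Yamaha-logo-500x188.png"
  else ""

-- ===== PORT B =====
def pvU1 : String := "https://www.toprace.com.ar/vistas/tr/images/logos/"
def pvU2 : String := "https://tc2000.com.ar/assets/images/"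
def pvU3 : String := "https://www.actc.org.ar/vistas/v3/images/logos/"
def pvU4 : String := "http://motorcycle-brands.com/wp-content/uploads/"

-- Source B's KEYWORDS dict in insertion order: keyword -> (rule priority, url)
def pvKEYWORDS : List (String × Nat × String) :=
  [ ("AUDI", 0, pvU1 ++ "logo-audi-sm.png"),
    ("APRILIA", 1, pvU4 ++ "2016/08/Aprilia-logo-500x188.png"),
    ("BETA", 2, pvU4 ++ "2017/10/Beta-Logo-500x393.png"),
    ("BMW", 3, pvU1 ++ "logo-bmw-sm.png"),
    ("CHEV", 4, pvU1 ++ "logo-chevrolet-sm.png"),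
    ("CRUZE", 4, pvU1 ++ "logo-chevrolet-sm.png"),
    ("ONIX", 4, pvU1 ++ "logo-chevrolet-sm.png"),
    ("CORSA", 4, pvU1 ++ "logo-chevrolet-sm.png"),
    ("CELTA", 4, pvU1 ++ "logo-chevrolet-sm.png"),
    ("CITROEN", 5, pvU1 ++ "logo-citroen-sm.png"),
    ("CITROËN", 5, pvU1 ++ "logo-citroen-sm.png"),
    ("C4", 5, pvU1 ++ "logo-citroen-sm.png"),
    ("DS3", 5, pvU1 ++ "logo-citroen-sm.png"),
    ("DODGE", 6, pvU3 ++ "logo-dodge-xs.png"),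
    ("DUCATI", 7, pvU4 ++ "2016/07/ducati-logo-500x188.png"),
    ("FIAT", 8, pvU1 ++ "logo-fiat-sm.png"),
    ("TIPO", 8, pvU1 ++ "logo-fiat-sm.png"),
    ("PALIO", 8, pvU1 ++ "logo-fiat-sm.png"),
    ("ARGO", 8, pvU1 ++ "logo-fiat-sm.png"),
    ("MOBI", 8, pvU1 ++ "logo-fiat-sm.png"),
    ("FORD", 9, pvU1 ++ "logo-ford-sm.png"),
    ("FOCUS", 9, pvU1 ++ "logo-ford-sm.png"),
    ("FIESTA", 9, pvU1 ++ "logo-ford-sm.png"),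
    ("KINETIC", 9, pvU1 ++ "logo-ford-sm.png"),
    ("GEELY", 10, pvU1 ++ "logo-geely-sm.png"),
    ("HRC", 11, pvU4 ++ "2016/08/honda-motorcycle-logo-500x188.png"),
    ("HONDA", 12, pvU2 ++ "logo_honda.png"),
    ("CIVIC", 12, pvU2 ++ "logo_honda.png"),
    ("HUSQVARNA", 13, pvU4 ++ "2016/08/Husqvarna-logo-500x188.png"),
    ("HYUNDAI", 14, ""),
    ("VELOSTER", 14, ""),
    ("KAWASAKI", 15, pvU4 ++ "2016/08/Kawasaki-logo-500x188.png"),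
    ("NINJA", 15, pvU4 ++ "2016/08/Kawasaki-logo-500x188.png"),
    ("KIA", 16, ""),
    ("CERATO", 16, ""),
    ("KTM", 17, pvU4 ++ "2016/08/KTM-logo-500x188.png"),
    ("MERCEDES", 18, pvU1 ++ "logo-mbenz-sm.png"),
    ("BENZ", 18, pvU1 ++ "logo-mbenz-sm.png"),
    ("MITSU", 19, pvU1 ++ "logo-mitsubishi-sm.png"),
    ("LANCER", 19, pvU1 ++ "logo-mitsubishi-sm.png"),
    ("MV AGUSTA", 20, pvU4 ++ "2017/10/mv-agusta-logo-500x345.png"),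
    ("AGUSTA", 20, pvU4 ++ "2017/10/mv-agusta-logo-500x345.png"),
    ("NISSAN", 21, pvU3 ++ "logo-nissan-xs.png"),
    ("MARCH", 21, pvU3 ++ "logo-nissan-xs.png"),
    ("PEUGEOT", 22, pvU1 ++ "logo-peugeot-sm.png"),
    ("408", 22, pvU1 ++ "logo-peugeot-sm.png"),
    ("208", 22, pvU1 ++ "logo-peugeot-sm.png"),
    ("POLARIS", 23, pvU4 ++ "2017/01/Polaris-Logo-500x276.png"),
    ("PORSCHE", 24, pvU1 ++ "logo-porsche-sm.png"),
    ("911", 24, pvU1 ++ "logo-porsche-sm.png"),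
    ("RENAULT", 25, pvU2 ++ "logo_renault.png"),
    ("CLIO", 25, pvU2 ++ "logo_renault.png"),
    ("SUZUKI", 26, pvU4 ++ "2016/08/suzuki-motorcycle-logo-500x188.png"),
    ("TORINO", 27, pvU3 ++ "logo-torino-xs.png"),
    ("TOYOTA", 28, pvU1 ++ "logo-toyota-sm.png"),
    ("COROLLA", 28, pvU1 ++ "logo-toyota-sm.png"),
    ("ETIOS", 28, pvU1 ++ "logo-toyota-sm.png"),
    ("TRIUMPH", 29, pvU4 ++ "2016/08/triumph-logo-500x188.png"),
    ("NTS", 29, pvU4 ++ "2016/08/triumph-logo-500x188.png"),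
    ("VW", 30, pvU1 ++ "logo-vw-sm.png"),
    ("VOLKS", 30, pvU1 ++ "logo-vw-sm.png"),
    ("VENTO", 30, pvU1 ++ "logo-vw-sm.png"),
    ("GOL", 30, pvU1 ++ "logo-vw-sm.png"),
    ("VOYAGE", 30, pvU1 ++ "logo-vw-sm.png"),
    ("VOLVO", 31, pvU1 ++ "logo-volvo-sm.png"),
    ("YAMAHA", 32, pvU4 ++ "2016/08/Yamaha-logo-500x188.png") ]

-- the loop body: keep the matching keyword's (pri, url) when it beats the best
-- so far ('best is None or pri < best[0]' = best.all (pri < ·.1))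
def pvStep (t : String) (best : Option (Nat × String)) (e : String × Nat × String) :
    Option (Nat × String) :=
  if PySem.Str.isIn e.1 t && best.all (fun b => decide (e.2.1 < b.1)) then some e.2 else best

def get_brand_logo_alt (txt : String) : String :=
  let t := PySem.Str.upper txt
  let best := pvKEYWORDS.foldl (pvStep t) none
  match best with
  | some b => b.2
  | none => ""

-- ===== PRECONDITION & SPEC =====
def Spec_get_brand_logo (txt : String) (out : String) : Prop := out = get_brand_logo_alt txt
instance (txt : String) (out : String) : Decidable (Spec_get_brand_logo txt out) := by unfold Spec_get_brand_logo; infer_instance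

-- ===== CLAIM (what is proved, stated in full; the proofs are below) =====
def Claim_equal_get_brand_logo : Prop := ∀ (txt : String), Dom_get_brand_logo txt → Spec_get_brand_logo txt (get_brand_logo txt)

-- ===== LEMMAS AND PROOFS =====

-- A's elif chain as first-match over a rule list (proof-side restatement of A)
def pvChain (t : String) : List (List String × String) → String
  | [] => ""
  | (ws, u) :: rest =>
      if ws.any (fun w => PySem.Str.isIn w t) then u else pvChain t rest

def pvRULES : List (List String × String) :=
  [ (["AUDI"], pvU1 ++ "logo-audi-sm.png"),
    (["APRILIA"], pvU4 ++ "2016/08/Aprilia-logo-500x188.png"),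
    (["BETA"], pvU4 ++ "2017/10/Beta-Logo-500x393.png"),
    (["BMW"], pvU1 ++ "logo-bmw-sm.png"),
    (["CHEV", "CRUZE", "ONIX", "CORSA", "CELTA"], pvU1 ++ "logo-chevrolet-sm.png"),
    (["CITROEN", "CITROËN", "C4", "DS3"], pvU1 ++ "logo-citroen-sm.png"),
    (["DODGE"], pvU3 ++ "logo-dodge-xs.png"),
    (["DUCATI"], pvU4 ++ "2016/07/ducati-logo-500x188.png"),
    (["FIAT", "TIPO", "PALIO", "ARGO", "MOBI"], pvU1 ++ "logo-fiat-sm.png"),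
    (["FORD", "FOCUS", "FIESTA", "KINETIC"], pvU1 ++ "logo-ford-sm.png"),
    (["GEELY"], pvU1 ++ "logo-geely-sm.png"),
    (["HRC"], pvU4 ++ "2016/08/honda-motorcycle-logo-500x188.png"),
    (["HONDA", "CIVIC"], pvU2 ++ "logo_honda.png"),
    (["HUSQVARNA"], pvU4 ++ "2016/08/Husqvarna-logo-500x188.png"),
    (["HYUNDAI", "VELOSTER"], ""),
    (["KAWASAKI", "NINJA"], pvU4 ++ "2016/08/Kawasaki-logo-500x188.png"),
    (["KIA", "CERATO"], ""),
    (["KTM"], pvU4 ++ "2016/08/KTM-logo-500x188.png"),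
    (["MERCEDES", "BENZ"], pvU1 ++ "logo-mbenz-sm.png"),
    (["MITSU", "LANCER"], pvU1 ++ "logo-mitsubishi-sm.png"),
    (["MV AGUSTA", "AGUSTA"], pvU4 ++ "2017/10/mv-agusta-logo-500x345.png"),
    (["NISSAN", "MARCH"], pvU3 ++ "logo-nissan-xs.png"),
    (["PEUGEOT", "408", "208"], pvU1 ++ "logo-peugeot-sm.png"),
    (["POLARIS"], pvU4 ++ "2017/01/Polaris-Logo-500x276.png"),
    (["PORSCHE", "911"], pvU1 ++ "logo-porsche-sm.png"),
    (["RENAULT", "CLIO"], pvU2 ++ "logo_renault.png"),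
    (["SUZUKI"], pvU4 ++ "2016/08/suzuki-motorcycle-logo-500x188.png"),
    (["TORINO"], pvU3 ++ "logo-torino-xs.png"),
    (["TOYOTA", "COROLLA", "ETIOS"], pvU1 ++ "logo-toyota-sm.png"),
    (["TRIUMPH", "NTS"], pvU4 ++ "2016/08/triumph-logo-500x188.png"),
    (["VW", "VOLKS", "VENTO", "GOL", "VOYAGE"], pvU1 ++ "logo-vw-sm.png"),
    (["VOLVO"], pvU1 ++ "logo-volvo-sm.png"),
    (["YAMAHA"], pvU4 ++ "2016/08/Yamaha-logo-500x188.png") ]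

-- flattening of a rule list into keyword entries, priorities starting at n
def pvFlat : Nat → List (List String × String) → List (String × Nat × String)
  | _, [] => []
  | n, (ws, u) :: rest => ws.map (fun w => (w, n, u)) ++ pvFlat (n + 1) rest

theorem pvFold_group (t : String) (ws : List String) (n : Nat) (u : String) :
    ∀ best : Option (Nat × String),
      (ws.map (fun w => (w, n, u))).foldl (pvStep t) best =
        if ws.any (fun w => PySem.Str.isIn w t) then
          (if best.all (fun b => decide (n < b.1)) then some (n, u) else best)
        else best := by
  induction ws with
  | nil => intro best; simp
  | cons w ws ih =>
      intro best
      by_cases hw : PySem.Str.isIn w t = true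
      · have hw' : PySem.Chars.isIn w.toList t.toList = true := by simpa using hw
        by_cases hb : best.all (fun b => decide (n < b.1)) = true
        · have hstep : pvStep t best (w, n, u) = some (n, u) := by
            simp [pvStep, hw', hb]
          have hkeep : (some (n, u) : Option (Nat × String)).all
              (fun b => decide (n < b.1)) = false := by simp
          simp [List.foldl_cons, hstep, ih, hw', hb, hkeep]
        · have hb' : best.all (fun b => decide (n < b.1)) = false := by
            simpa using hb
          have hstep : pvStep t best (w, n, u) = best := by
            simp [pvStep, hb']
          simp [List.foldl_cons, hstep, ih, hw', hb']
      · have hw' : PySem.Chars.isIn w.toList t.toList = false := by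
          simpa using hw
        have hstep : pvStep t best (w, n, u) = best := by
          simp [pvStep, hw']
        simp [List.foldl_cons, hstep, ih, hw']

theorem pvFold_keeps (t : String) (rules : List (List String × String)) :
    ∀ (n m : Nat) (v : String), m ≤ n →
      (pvFlat n rules).foldl (pvStep t) (some (m, v)) = some (m, v) := by
  induction rules with
  | nil => intro n m v _; simp [pvFlat]
  | cons r rest ih =>
      intro n m v hmn
      obtain ⟨ws, u⟩ := r
      have hall : (some (m, v) : Option (Nat × String)).all
          (fun b => decide (n < b.1)) = false := by
        simp [Nat.not_lt.mpr hmn]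
      rw [pvFlat, List.foldl_append, pvFold_group, hall]
      by_cases h : ws.any (fun w => PySem.Str.isIn w t) = true
      · simp only [h, if_true]
        exact ih (n + 1) m v (Nat.le_succ_of_le hmn)
      · have h' : ws.any (fun w => PySem.Str.isIn w t) = false := by simpa using h
        simp only [h']
        exact ih (n + 1) m v (Nat.le_succ_of_le hmn)

theorem pvFold_chain (t : String) (rules : List (List String × String)) :
    ∀ n : Nat,
      (match (pvFlat n rules).foldl (pvStep t) none with
       | some b => b.2
       | none => "") = pvChain t rules := by
  induction rules with
  | nil => intro n; simp [pvFlat, pvChain]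
  | cons r rest ih =>
      intro n
      obtain ⟨ws, u⟩ := r
      rw [pvFlat, List.foldl_append, pvFold_group]
      by_cases h : ws.any (fun w => PySem.Str.isIn w t) = true
      · simp only [h, if_true, Option.all_none, if_true, pvChain]
        rw [pvFold_keeps t rest (n + 1) n u (Nat.le_succ n)]
      · have h' : ws.any (fun w => PySem.Str.isIn w t) = false := by simpa using h
        simp only [h', pvChain]
        exact ih (n + 1)

theorem pvKEYWORDS_flat : pvKEYWORDS = pvFlat 0 pvRULES := by decide

theorem pvA_chain (txt : String) :
    get_brand_logo txt = pvChain (PySem.Str.upper txt) pvRULES := by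
  simp only [get_brand_logo, pvRULES, pvChain, pvU1, pvU2, pvU3, pvU4,
    List.any_cons, List.any_nil, Bool.or_false]

-- ===== VERDICT (by name: the statement is the Claim_ definition above) =====
theorem get_brand_logo_spec : Claim_equal_get_brand_logo := by
  intro txt _
  unfold Spec_get_brand_logo get_brand_logo_alt
  rw [pvA_chain, pvKEYWORDS_flat]
  exact (pvFold_chain (PySem.Str.upper txt) pvRULES 0).symm
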